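-- pv_equiv track=rewrite | github.com/matthewyeung35/Appraisal-automation | appraisal program.py | floor_comment_gen
-- ===== SOURCE A (Python) =====
-- def floor_comment_gen(flooring):
--     result = ('')
--     floor_type_count = 0
--     floor_type_total = len(flooring)
--     for i in flooring:
--         if i == '0':
--             result += ('hardwood')
--         elif i == '2':
--             result += ('laminate')
--         elif i == '1':
--             result += ('broadloom')
--         elif i == '3':
--             result += ('ceramic tiles')
--         if floor_type_count < (floor_type_total-2):
--             result += (', ')
--         elif floor_type_count == (floor_type_total-2):
--             result += (', and ')
--         floor_type_count += 1
--     return result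
-- ===== SOURCE B (Python) =====
-- _FLOOR_WORDS = {'0': 'hardwood', '1': 'broadloom', '2': 'laminate', '3': 'ceramic tiles'}
--
-- def floor_comment_gen(flooring):
--     words = [_FLOOR_WORDS.get(c, '') for c in flooring]
--     if len(words) < 2:
--         return ''.join(words)
--     return ', '.join(words[:-1]) + ', and ' + words[-1]
-- ===== Notes on version B (the rewrite author's own statement) =====
-- stated objective: simpler
-- what changed: Replaces the running-counter loop with inline separator tests by a dict-lookup map to words followed by a single slice/join assembly (', '.join of all but last, then ', and ' plus the last word).
import Mathlib
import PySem

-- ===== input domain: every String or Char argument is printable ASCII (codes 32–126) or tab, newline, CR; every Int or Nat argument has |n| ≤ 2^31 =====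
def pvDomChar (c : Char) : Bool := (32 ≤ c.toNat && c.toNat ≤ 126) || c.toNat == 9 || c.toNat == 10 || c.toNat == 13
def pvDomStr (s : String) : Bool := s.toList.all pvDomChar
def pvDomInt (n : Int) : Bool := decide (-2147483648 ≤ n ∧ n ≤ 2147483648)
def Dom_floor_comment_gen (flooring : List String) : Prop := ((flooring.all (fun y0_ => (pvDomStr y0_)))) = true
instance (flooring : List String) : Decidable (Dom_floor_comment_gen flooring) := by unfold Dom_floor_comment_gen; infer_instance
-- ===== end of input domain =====

-- B replaces A's running-counter loop with inline separator tests by a dict-lookup map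
-- followed by one slice/join assembly (objective: simpler decomposition; same O(n) cost).

-- ===== PORT A =====
-- the loop body of A, carried as (result, floor_type_count); floor_type_total is a parameter
def fcStep (floor_type_total : Int) (st : String × Int) (i : String) : String × Int :=
  let result := st.1
  let floor_type_count := st.2
  let result :=
    if i == "0" then result ++ "hardwood"
    else if i == "2" then result ++ "laminate"
    else if i == "1" then result ++ "broadloom"
    else if i == "3" then result ++ "ceramic tiles"
    else result
  let result :=
    if floor_type_count < floor_type_total - 2 then result ++ ", "
    else if floor_type_count = floor_type_total - 2 then result ++ ", and "
    else result
  (result, floor_type_count + 1)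

def floor_comment_gen (flooring : List String) : String :=
  let floor_type_total : Int := flooring.length
  (flooring.foldl (fcStep floor_type_total) ("", 0)).1

-- ===== PORT B =====
-- the dict literal _FLOOR_WORDS, built in insertion order
def floorWords : PySem.Dict String String :=
  (((PySem.Dict.empty.insert "0" "hardwood").insert "1" "broadloom").insert
      "2" "laminate").insert "3" "ceramic tiles"

def floor_comment_gen_alt (flooring : List String) : String :=
  let words := flooring.map (fun c => floorWords.getD c "")
  if words.length < 2 then PySem.Str.join "" words
  else PySem.Str.join ", " (PySem.List.slice words none (some (-1))) ++ ", and "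
        ++ PySem.List.pyGetD words (-1) ""

-- ===== PRECONDITION & SPEC =====
def Spec_floor_comment_gen (flooring : List String) (out : String) : Prop := out = floor_comment_gen_alt flooring
instance (flooring : List String) (out : String) : Decidable (Spec_floor_comment_gen flooring out) := by unfold Spec_floor_comment_gen; infer_instance

-- ===== CLAIM (what is proved, stated in full; the proofs are below) =====
def Claim_equal_floor_comment_gen : Prop := ∀ (flooring : List String), Dom_floor_comment_gen flooring → Spec_floor_comment_gen flooring (floor_comment_gen flooring)

-- ===== LEMMAS AND PROOFS =====

-- the word each code maps to (A's if-chain; B's dict agrees, fcWord_eq_getD)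
def fcWord (i : String) : String :=
  if i == "0" then "hardwood"
  else if i == "2" then "laminate"
  else if i == "1" then "broadloom"
  else if i == "3" then "ceramic tiles"
  else ""

lemma fcWord_eq_getD (s : String) : floorWords.getD s "" = fcWord s := by
  simp only [floorWords, fcWord, PySem.Dict.getD_insert, PySem.Dict.getD_empty]
  split_ifs <;> simp_all

lemma fc_word_step (r i : String) :
    (if i == "0" then r ++ "hardwood"
     else if i == "2" then r ++ "laminate"
     else if i == "1" then r ++ "broadloom"
     else if i == "3" then r ++ "ceramic tiles"
     else r) = r ++ fcWord i := by
  unfold fcWord; split_ifs <;> simp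

lemma fcStep_eq (total : Int) (r : String) (c : Int) (i : String) :
    fcStep total (r, c) i =
      (r ++ fcWord i ++
        (if c < total - 2 then ", " else if c = total - 2 then ", and " else ""),
       c + 1) := by
  unfold fcStep
  dsimp only
  rw [fc_word_step]
  split_ifs <;> simp

-- the common shape of both outputs
def fcRend : List String → String
  | [] => ""
  | [a] => fcWord a
  | a :: b :: rest =>
      fcWord a ++ ((if 1 ≤ rest.length then ", " else ", and ") ++ fcRend (b :: rest))

lemma fc_loop (total : Int) (ws : List String) : ∀ (c : Int) (r : String),
    c = total - ws.length →
    (ws.foldl (fcStep total) (r, c)).1 = r ++ fcRend ws := by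
  induction ws with
  | nil => intro c r _; simp [fcRend]
  | cons a tl ih =>
    intro c r h
    simp only [List.length_cons] at h
    rw [List.foldl_cons, fcStep_eq]
    cases tl with
    | nil =>
      have h1 : ¬ (c < total - 2) := by simp at h; omega
      have h2 : ¬ (c = total - 2) := by simp at h; omega
      simp [h1, h2, fcRend]
    | cons b rest =>
      simp only [List.length_cons] at h
      rw [ih (c + 1) _ (by push_cast [List.length_cons] at h ⊢; omega)]
      by_cases hr : 1 ≤ rest.length
      · have h1 : c < total - 2 := by push_cast at h; omega
        simp [h1, fcRend, hr, String.append_assoc]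
      · have h1 : ¬ (c < total - 2) := by push_cast at h; omega
        have h2 : c = total - 2 := by push_cast at h; omega
        simp [h2, fcRend, hr, String.append_assoc]

lemma fcA_eq_rend (flooring : List String) : floor_comment_gen flooring = fcRend flooring := by
  unfold floor_comment_gen
  rw [fc_loop (flooring.length : Int) flooring 0 "" (by simp)]
  simp

lemma fc_join_singleton (sep p : String) : PySem.Str.join sep [p] = p := by
  apply String.toList_injective; simp [PySem.Chars.join_singleton]

lemma fc_join_cons_cons (sep p q : String) (rest : List String) :
    PySem.Str.join sep (p :: q :: rest) = p ++ sep ++ PySem.Str.join sep (q :: rest) := by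
  apply String.toList_injective; simp [PySem.Chars.join_cons_cons]

lemma fc_slice_neg_one {α : Type} (xs : List α) :
    PySem.List.slice xs none (some (-1)) = xs.dropLast := by
  simp [PySem.List.slice, List.dropLast_eq_take]

lemma fc_last_cons_cons (x y : String) (l : List String) :
    PySem.List.pyGetD (x :: y :: l) (-1) "" = PySem.List.pyGetD (y :: l) (-1) "" := by
  rw [PySem.List.pyGetD_neg_one _ _ (by simp), PySem.List.pyGetD_neg_one _ _ (by simp)]
  simp [List.getLast_cons]

lemma fcB_eq_rend (flooring : List String) : floor_comment_gen_alt flooring = fcRend flooring := by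
  induction flooring with
  | nil => rfl
  | cons a tl ih =>
    cases tl with
    | nil => simp [floor_comment_gen_alt, fc_join_singleton, fcRend, fcWord_eq_getD]
    | cons b rest =>
      simp only [floor_comment_gen_alt, List.map_cons, List.length_cons] at ih ⊢
      rw [if_neg (by simp), fc_slice_neg_one, fc_last_cons_cons]
      cases rest with
      | nil =>
        rw [PySem.List.pyGetD_neg_one _ _ (by simp)]
        simp [fc_join_singleton, fcRend, fcWord_eq_getD, String.append_assoc]
      | cons c rs =>
        rw [if_neg (by simp), fc_slice_neg_one] at ih
        simp only [List.map_cons] at ih ⊢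
        rw [List.dropLast_cons₂] at ih
        rw [List.dropLast_cons₂, List.dropLast_cons₂, fc_join_cons_cons]
        rw [show fcRend (a :: b :: c :: rs)
              = fcWord a ++ (", " ++ fcRend (b :: c :: rs)) from by simp [fcRend]]
        rw [← ih, ← fcWord_eq_getD]
        simp [String.append_assoc]

-- ===== VERDICT (by name: the statement is the Claim_ definition above) =====
theorem floor_comment_gen_spec : Claim_equal_floor_comment_gen := by
  intro flooring _
  unfold Spec_floor_comment_gen
  rw [fcA_eq_rend, fcB_eq_rend]
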